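-- pv_equiv track=rewrite | github.com/RonaldBecerra/Ejercicios-individuales-Python | Secuencias_ceros_unos.py | contiene_patron_010
-- ===== SOURCE A (Python) =====
-- def contiene_patron_010(sec):
--     """
--     Determina si una secuencia dada tiene el patrón 010
--
--     Parámetro:
--         sec: Secuencia a analizar.
--     """
--     patron = ""
--     for elem in sec:
--         if elem == "0":
--             if patron == "":
--                 patron = elem
--             elif patron == "01":
--                 return True
--         elif elem == "1":
--             if patron == "0":
--                 patron += elem
--             elif patron == "01":
--                 patron = ""
--     return False
-- ===== SOURCE B (Python) =====
-- def contiene_patron_010(sec):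
--     s = ''.join(e for e in sec if e == '0' or e == '1')
--     return '010' in s
-- ===== Notes on version B (the rewrite author's own statement) =====
-- stated objective: idiomatic
-- what changed: Replaces A's hand-written state machine with filtering the sequence to its '0'/'1' elements and a substring membership test '010' in s.
import Mathlib
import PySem

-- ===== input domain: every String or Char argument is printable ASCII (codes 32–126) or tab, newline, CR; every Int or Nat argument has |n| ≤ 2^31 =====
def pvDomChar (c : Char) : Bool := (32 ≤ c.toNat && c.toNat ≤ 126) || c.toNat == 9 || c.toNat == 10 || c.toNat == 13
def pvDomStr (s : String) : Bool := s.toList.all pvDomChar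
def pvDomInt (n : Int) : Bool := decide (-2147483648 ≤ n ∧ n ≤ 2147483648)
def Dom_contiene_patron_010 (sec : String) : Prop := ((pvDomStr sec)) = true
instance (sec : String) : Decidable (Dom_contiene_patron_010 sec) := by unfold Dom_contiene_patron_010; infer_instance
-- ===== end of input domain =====

-- B replaces A's explicit state machine by filtering the sequence to its '0'/'1'
-- characters and a substring membership test ('010' in s) — more idiomatic, same cost.


-- ===== PORT A =====
-- patron is Python's accumulator string, kept as a List Char; the loop with its
-- early 'return True' is the structural recursion below, branches in source order.
def contieneGoA : List Char → List Char → Bool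
  | [], _ => false
  | elem :: rest, patron =>
    if elem = '0' then
      if patron = [] then contieneGoA rest [elem]          -- patron = elem
      else if patron = ['0', '1'] then true                -- return True
      else contieneGoA rest patron
    else if elem = '1' then
      if patron = ['0'] then contieneGoA rest (patron ++ [elem])   -- patron += elem
      else if patron = ['0', '1'] then contieneGoA rest []         -- patron = ""
      else contieneGoA rest patron
    else contieneGoA rest patron

def contiene_patron_010 (sec : String) : Bool := contieneGoA sec.toList []

-- ===== PORT B =====
def contiene_patron_010_alt (sec : String) : Bool :=
  PySem.Str.isIn "010" (String.ofList (sec.toList.filter (fun e => e == '0' || e == '1')))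

-- ===== PRECONDITION & SPEC =====
def Spec_contiene_patron_010 (sec : String) (out : Bool) : Prop := out = contiene_patron_010_alt sec
instance (sec : String) (out : Bool) : Decidable (Spec_contiene_patron_010 sec out) := by unfold Spec_contiene_patron_010; infer_instance

-- ===== CLAIM (what is proved, stated in full; the proofs are below) =====
def Claim_equal_contiene_patron_010 : Prop := ∀ (sec : String), Dom_contiene_patron_010 sec → Spec_contiene_patron_010 sec (contiene_patron_010 sec)

-- ===== LEMMAS AND PROOFS =====

-- The DFA run from each of its three reachable states finds '010' exactly when
-- the state's matched prefix glued onto the filtered rest contains it as an infix.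
theorem contieneGoA_infix (cs : List Char) :
    (contieneGoA cs [] = true ↔ ['0','1','0'] <:+: cs.filter (fun e => e == '0' || e == '1'))
    ∧ (contieneGoA cs ['0'] = true ↔ ['0','1','0'] <:+: '0' :: cs.filter (fun e => e == '0' || e == '1'))
    ∧ (contieneGoA cs ['0','1'] = true ↔ ['0','1','0'] <:+: '0' :: '1' :: cs.filter (fun e => e == '0' || e == '1')) := by
  induction cs with
  | nil => refine ⟨?_, ?_, ?_⟩ <;> simp [contieneGoA] <;> decide
  | cons c cs ih =>
    obtain ⟨ih0, ih1, ih2⟩ := ih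
    by_cases h0 : c = '0'
    · subst h0
      have hf : List.filter (fun e => e == '0' || e == '1') ('0' :: cs)
          = '0' :: List.filter (fun e => e == '0' || e == '1') cs := by
        simp
      refine ⟨?_, ?_, ?_⟩
      · rw [hf]; simpa [contieneGoA] using ih1
      · rw [hf]
        have : contieneGoA ('0' :: cs) ['0'] = contieneGoA cs ['0'] := by
          simp [contieneGoA]
        rw [this, ih1]
        simp [List.infix_cons_iff, List.cons_prefix_cons]
      · rw [hf]
        have : contieneGoA ('0' :: cs) ['0','1'] = true := by simp [contieneGoA]
        rw [this]
        simp only [true_iff]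
        exact ⟨[], List.filter (fun e => e == '0' || e == '1') cs, by simp⟩
    · by_cases h1 : c = '1'
      · subst h1
        have hf : List.filter (fun e => e == '0' || e == '1') ('1' :: cs)
            = '1' :: List.filter (fun e => e == '0' || e == '1') cs := by
          simp
        refine ⟨?_, ?_, ?_⟩
        · rw [hf]
          have : contieneGoA ('1' :: cs) [] = contieneGoA cs [] := by simp [contieneGoA]
          rw [this, ih0]
          simp [List.infix_cons_iff, List.cons_prefix_cons]
        · rw [hf]; simpa [contieneGoA] using ih2
        · rw [hf]
          have : contieneGoA ('1' :: cs) ['0','1'] = contieneGoA cs [] := by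
            simp [contieneGoA]
          rw [this, ih0]
          simp [List.infix_cons_iff, List.cons_prefix_cons]
      · have hf : List.filter (fun e => e == '0' || e == '1') (c :: cs)
            = List.filter (fun e => e == '0' || e == '1') cs := by
          simp [h0, h1]
        refine ⟨?_, ?_, ?_⟩ <;> rw [hf] <;> simp only [contieneGoA, if_neg h0, if_neg h1]
        · exact ih0
        · simpa using ih1
        · simpa using ih2

-- ===== VERDICT (by name: the statement is the Claim_ definition above) =====
theorem contiene_patron_010_spec : Claim_equal_contiene_patron_010 := by
  intro sec _
  unfold Spec_contiene_patron_010 contiene_patron_010 contiene_patron_010_alt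
  rw [Bool.eq_iff_iff, PySem.Str.isIn_iff_infix, String.toList_ofList]
  simpa using (contieneGoA_infix sec.toList).1
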